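-- pv_equiv track=rewrite | github.com/KaplanHalil/BlockCipherTestTool | AvalCorrTests/yedek.py | convert_2d_list
-- ===== SOURCE A (Python) =====
-- def convert_2d_list(input_list):
--     def convert_value(value):
--         if 0 <= value < 100:
--             return 0
--         elif 100 <= value < 200:
--             return 50
--         elif 200 <= value < 300:
--             return 100
--         elif 300 <= value < 400:
--             return 150
--         elif 400 <= value < 600:
--             return 255
--         elif 600 <= value < 700:
--             return 150
--         elif 700 <= value < 800:
--             return 100
--         elif 800 <= value < 900:
--             return 50
--         elif 900 <= value < 1000:
--             return 0
--         else:
--             raise ValueError(f"Value {value} is out of range 0-1000.")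
--
--     return [[convert_value(value) for value in row] for row in input_list]
-- ===== SOURCE B (Python) =====
-- def convert_2d_list(input_list):
--     def convert_value(value):
--         if not 0 <= value < 1000:
--             raise ValueError(f"Value {value} is out of range 0-1000.")
--         # The bucket profile is symmetric about the interval's midpoint:
--         # fold onto [0,499] via min(value, 999 - value), then one division
--         # gives the ramp 0,50,100,150 with the plateau 255 at the top step.
--         t = min(value, 999 - value) // 100
--         return 255 if t == 4 else 50 * t
--     return [[convert_value(value) for value in row] for row in input_list]
-- ===== Notes on version B (the rewrite author's own statement) =====
-- stated objective: alternative
-- what changed: Replaces the nine-branch bucket table by an arithmetic closed form: the profile is symmetric, so each value is folded onto [0,499] with min(value, 999-value) and the result is computed as 50*(m//100) with a 255 plateau at the top step; no bucket table or comparison chain remains.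
import Mathlib
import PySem

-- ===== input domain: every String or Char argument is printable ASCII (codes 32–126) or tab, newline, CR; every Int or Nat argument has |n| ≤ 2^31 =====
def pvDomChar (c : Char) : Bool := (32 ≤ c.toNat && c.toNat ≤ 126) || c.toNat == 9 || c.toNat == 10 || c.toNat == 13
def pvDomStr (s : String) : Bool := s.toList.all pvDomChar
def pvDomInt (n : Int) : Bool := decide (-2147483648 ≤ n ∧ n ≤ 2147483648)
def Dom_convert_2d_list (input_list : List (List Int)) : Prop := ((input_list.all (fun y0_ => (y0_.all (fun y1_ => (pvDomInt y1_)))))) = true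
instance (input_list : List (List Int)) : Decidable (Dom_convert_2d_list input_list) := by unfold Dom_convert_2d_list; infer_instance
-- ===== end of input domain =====

-- B exploits the symmetry of the bucket profile about the midpoint: each value is folded
-- onto [0,499] with min(value, 999-value) and mapped by one division to 50*t with a 255
-- plateau, instead of A's nine-way comparison chain; same ValueError guard, excluded by Pre_.

-- ===== PORT A =====
-- A's convert_value: the comparison chain, in source order.
-- The final 'else' raises ValueError; Pre_convert_2d_list excludes those inputs.
def pvCvA (value : Int) : Int :=
  if 0 ≤ value ∧ value < 100 then 0
  else if 100 ≤ value ∧ value < 200 then 50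
  else if 200 ≤ value ∧ value < 300 then 100
  else if 300 ≤ value ∧ value < 400 then 150
  else if 400 ≤ value ∧ value < 600 then 255
  else if 600 ≤ value ∧ value < 700 then 150
  else if 700 ≤ value ∧ value < 800 then 100
  else if 800 ≤ value ∧ value < 900 then 50
  else if 900 ≤ value ∧ value < 1000 then 0
  else 0  -- raise ValueError: outside Pre_convert_2d_list

def convert_2d_list (input_list : List (List Int)) : List (List Int) :=
  input_list.map (fun row => row.map pvCvA)

-- ===== PORT B =====
-- B's convert_value: guard, symmetry fold, one floor division.
def pvCvB (value : Int) : Int :=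
  if ¬ (0 ≤ value ∧ value < 1000) then 0  -- raise ValueError: outside Pre_convert_2d_list
  else
    let t := PySem.Int.floordiv (min value (999 - value)) 100
    if t = 4 then 255 else 50 * t

def convert_2d_list_alt (input_list : List (List Int)) : List (List Int) :=
  input_list.map (fun row => row.map pvCvB)

-- ===== PRECONDITION & SPEC =====
-- Pre_ excludes exactly the inputs on which A (and B) raise ValueError:
-- any value < 0 or ≥ 1000.
def Pre_convert_2d_list (input_list : List (List Int)) : Prop :=
  (input_list.all (fun row => row.all (fun v => decide (0 ≤ v ∧ v < 1000)))) = true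
instance (input_list : List (List Int)) : Decidable (Pre_convert_2d_list input_list) := by
  unfold Pre_convert_2d_list; infer_instance

def pvWitness_convert_2d_list : List (List Int) := [[0, 99, 100, 450], [900, 999]]

def Spec_convert_2d_list (input_list : List (List Int)) (out : List (List Int)) : Prop := out = convert_2d_list_alt input_list
instance (input_list : List (List Int)) (out : List (List Int)) : Decidable (Spec_convert_2d_list input_list out) := by unfold Spec_convert_2d_list; infer_instance

-- ===== CLAIM =====
def Claim_equal_convert_2d_list : Prop := ∀ (input_list : List (List Int)), Dom_convert_2d_list input_list → Pre_convert_2d_list input_list → Spec_convert_2d_list input_list (convert_2d_list input_list)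

-- ===== LEMMAS AND PROOFS =====
lemma pvCv_eq (v : Int) (h0 : 0 ≤ v) (h1 : v < 1000) : pvCvA v = pvCvB v := by
  unfold pvCvA pvCvB
  rw [PySem.Int.floordiv_eq_ediv_of_pos (by omega : (0:Int) < 100)]
  simp only [min_def]
  split_ifs <;> omega

-- ===== VERDICT =====
theorem convert_2d_list_spec : Claim_equal_convert_2d_list := by
  intro l _ hpre
  unfold Spec_convert_2d_list convert_2d_list convert_2d_list_alt
  apply List.map_congr_left
  intro row hrow
  apply List.map_congr_left
  intro v hv
  simp only [Pre_convert_2d_list, List.all_eq_true, decide_eq_true_eq] at hpre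
  obtain ⟨h0, h1⟩ := hpre row hrow v hv
  exact pvCv_eq v h0 h1
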